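-- pv_equiv track=rewrite | github.com/yunikeil/BjkOlmp | src/__public/clients/ws_python.py | fold_strings
-- ===== SOURCE A (Python) =====
-- def fold_strings(string: str, string_: str):
--     result_lines = []
--     lines_0 = string.splitlines()
--     lines_1 = string_.splitlines()
--
--     for line_0, line_1 in zip(lines_0, lines_1):
--         result_lines.append(line_0 + " " +line_1)
--
--     if len(lines_0) > len(lines_1):
--         result_lines.extend(lines_0[len(lines_1):])
--     elif len(lines_1) > len(lines_0):
--         result_lines.extend(lines_1[len(lines_0):])
--
--     return "\n".join(result_lines)
-- ===== SOURCE B (Python) =====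
-- def fold_strings(string: str, string_: str):
--     # Streaming merge: walk both raw strings with cursors, emitting the merged
--     # output character by character; no splitlines, no line lists.
--     out = []
--     i, j, n, m = 0, 0, len(string), len(string_)
--     first = True
--     while i < n or j < m:
--         if not first:
--             out.append('\n')
--         first = False
--         if i < n:
--             while i < n and string[i] != '\n' and string[i] != '\r':
--                 out.append(string[i])
--                 i += 1
--             if i < n:
--                 i += 2 if string[i] == '\r' and i + 1 < n and string[i + 1] == '\n' else 1
--             if j < m:
--                 out.append(' ')
--         if j < m:
--             while j < m and string_[j] != '\n' and string_[j] != '\r':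
--                 out.append(string_[j])
--                 j += 1
--             if j < m:
--                 j += 2 if string_[j] == '\r' and j + 1 < m and string_[j + 1] == '\n' else 1
--     return ''.join(out)
-- ===== Notes on version B (the rewrite author's own statement) =====
-- stated objective: alternative
-- what changed: B is a character-level streaming merge: it walks both raw strings with two cursors and emits the merged output directly, never calling splitlines or building line lists, replacing A's split-then-zip-then-extend-then-join pipeline.
import Mathlib
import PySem

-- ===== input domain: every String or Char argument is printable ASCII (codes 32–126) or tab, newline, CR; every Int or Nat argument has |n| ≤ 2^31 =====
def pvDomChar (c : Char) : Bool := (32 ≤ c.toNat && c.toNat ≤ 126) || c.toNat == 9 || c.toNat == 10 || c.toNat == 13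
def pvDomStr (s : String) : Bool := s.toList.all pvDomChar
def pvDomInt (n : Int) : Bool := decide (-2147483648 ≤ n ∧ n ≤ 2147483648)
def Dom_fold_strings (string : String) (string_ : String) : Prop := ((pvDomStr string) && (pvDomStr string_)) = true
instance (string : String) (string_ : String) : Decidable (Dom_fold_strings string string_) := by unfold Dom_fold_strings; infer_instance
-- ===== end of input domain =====

-- B is a character-level streaming merge: it walks both raw strings with cursors and emits
-- the merged output directly, never building the line lists A's splitlines/zip/join pipeline does.

-- ===== PORT A =====
def fold_strings (string : String) (string_ : String) : String :=
  let lines_0 := PySem.Str.splitlines string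
  let lines_1 := PySem.Str.splitlines string_
  let result_lines := (lines_0.zip lines_1).foldl
    (fun acc (p : String × String) => acc ++ [p.1 ++ " " ++ p.2]) []
  let result_lines :=
    if lines_0.length > lines_1.length then
      result_lines ++ PySem.List.slice lines_0 (some (lines_1.length : Int)) none
    else if lines_1.length > lines_0.length then
      result_lines ++ PySem.List.slice lines_1 (some (lines_0.length : Int)) none
    else result_lines
  PySem.Str.join "\n" result_lines

-- ===== PORT B =====
-- Source B's inner while-loop + break skip: consume one line's characters and the break ending it
def pvTakeLine : List Char → List Char × List Char
  | [] => ([], [])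
  | c :: rest =>
    if c = '\n' then ([], rest)
    else if c = '\r' then
      match rest with
      | '\n' :: rest' => ([], rest')
      | _ => ([], rest)
    else
      let p := pvTakeLine rest
      (c :: p.1, p.2)

lemma pvTakeLine_le : ∀ (s : List Char), (pvTakeLine s).2.length ≤ s.length := by
  intro s
  induction s with
  | nil => simp [pvTakeLine]
  | cons c rest ih =>
    simp only [pvTakeLine]
    split
    · simp
    · split
      · cases rest with
        | nil => simp
        | cons d rest' =>
          cases hd : d == '\n' <;> simp_all <;> omega
      · simpa using Nat.le_succ_of_le ih

lemma pvTakeLine_shrink : ∀ (s : List Char), s ≠ [] → (pvTakeLine s).2.length < s.length := by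
  intro s hs
  cases s with
  | nil => exact absurd rfl hs
  | cons c rest =>
    simp only [pvTakeLine]
    split
    · simp
    · split
      · cases rest with
        | nil => simp
        | cons d rest' =>
          cases hd : d == '\n' <;> simp_all <;> omega
      · have := pvTakeLine_le rest
        simp only [List.length_cons]
        omega

-- Source B's outer while-loop over the two cursors, as recursion on the remaining suffixes
def pvMerge (s t : List Char) : List Char :=
  match hs : s, ht : t with
  | [], [] => []
  | [], _ :: _ =>
    let p := pvTakeLine t
    p.1 ++ (if p.2 = [] then [] else '\n' :: pvMerge [] p.2)
  | _ :: _, [] =>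
    let p := pvTakeLine s
    p.1 ++ (if p.2 = [] then [] else '\n' :: pvMerge p.2 [])
  | _ :: _, _ :: _ =>
    let p := pvTakeLine s
    let q := pvTakeLine t
    p.1 ++ ' ' :: q.1 ++
      (if p.2 = [] ∧ q.2 = [] then [] else '\n' :: pvMerge p.2 q.2)
  termination_by s.length + t.length
  decreasing_by
  · have := pvTakeLine_shrink t (by rw [ht]; simp); simp only [← ht]; omega
  · have := pvTakeLine_shrink s (by rw [hs]; simp); simp only [← hs]; omega
  · have h1 := pvTakeLine_shrink s (by rw [hs]; simp)
    have h2 := pvTakeLine_shrink t (by rw [ht]; simp)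
    simp only [← hs, ← ht]; omega

def fold_strings_alt (string : String) (string_ : String) : String :=
  String.ofList (pvMerge string.toList string_.toList)

-- ===== PRECONDITION & SPEC =====
def Spec_fold_strings (string : String) (string_ : String) (out : String) : Prop := out = fold_strings_alt string string_
instance (string : String) (string_ : String) (out : String) : Decidable (Spec_fold_strings string string_ out) := by unfold Spec_fold_strings; infer_instance

-- ===== CLAIM (what is proved, stated in full; the proofs are below) =====
def Claim_equal_fold_strings : Prop := ∀ (string : String) (string_ : String), Dom_fold_strings string string_ → Spec_fold_strings string string_ (fold_strings string string_)

-- ===== LEMMAS AND PROOFS =====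

-- line list induced by pvTakeLine (proof-side characterisation of splitlines on Dom)
def pvLinesOf (s : List Char) : List (List Char) :=
  match hs : s with
  | [] => []
  | _ :: _ => (pvTakeLine s).1 :: pvLinesOf (pvTakeLine s).2
  termination_by s.length
  decreasing_by
  · have := pvTakeLine_shrink s (by rw [hs]; simp); simp only [← hs]; omega

-- char-level merged rows (mirror of A's zip-then-extend, on List Char lines)
def pvRows : List (List Char) → List (List Char) → List (List Char)
  | [], ys => ys
  | xs, [] => xs
  | x :: xs, y :: ys => (x ++ ' ' :: y) :: pvRows xs ys

-- A's zip-then-extend at String level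
def pvMergeLongest : List String → List String → List String
  | [], ys => ys
  | xs, [] => xs
  | x :: xs, y :: ys => (x ++ " " ++ y) :: pvMergeLongest xs ys

lemma pvLinesOf_nil : pvLinesOf [] = [] := by rw [pvLinesOf]

lemma pvLinesOf_cons (c : Char) (r : List Char) :
    pvLinesOf (c :: r) = (pvTakeLine (c :: r)).1 :: pvLinesOf (pvTakeLine (c :: r)).2 := by
  rw [pvLinesOf]

lemma pvLinesOf_ne_nil (s : List Char) (h : s ≠ []) : pvLinesOf s ≠ [] := by
  cases s with
  | nil => exact absurd rfl h
  | cons c r => rw [pvLinesOf_cons]; simp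

lemma pvRows_nil_left (ys : List (List Char)) : pvRows [] ys = ys := by
  cases ys <;> rfl

lemma pvRows_nil_right (xs : List (List Char)) : pvRows xs [] = xs := by
  cases xs <;> rfl

lemma pvRows_ne_nil (xs ys : List (List Char)) (h : xs ≠ [] ∨ ys ≠ []) :
    pvRows xs ys ≠ [] := by
  cases xs with
  | nil => rw [pvRows_nil_left]; tauto
  | cons x xs' => cases ys with
    | nil => simp [pvRows_nil_right]
    | cons y ys' => simp [pvRows]

lemma pvTakeLine_cr (d : Char) (rest' : List Char) (hd : d ≠ '\n') :
    pvTakeLine ('\r' :: d :: rest') = ([], d :: rest') := by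
  simp only [pvTakeLine, if_neg (by decide : ¬('\r' : Char) = '\n'), if_pos rfl]
  split <;> simp_all

lemma pvChar_toNat_ten (c : Char) (h : c.toNat = 10) : c = '\n' := by
  have h2 : Char.ofNat c.toNat = Char.ofNat 10 := by rw [h]
  rwa [Char.ofNat_toNat] at h2

lemma pvChar_toNat_thirteen (c : Char) (h : c.toNat = 13) : c = '\r' := by
  have h2 : Char.ofNat c.toNat = Char.ofNat 13 := by rw [h]
  rwa [Char.ofNat_toNat] at h2

-- equation lemmas for PySem.Chars.splitlines.go
lemma pvGo_nil (isB : Char → Bool) (cur : List Char) (acc : List (List Char)) :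
    PySem.Chars.splitlines.go isB [] cur acc =
      if cur.isEmpty then acc.reverse else (cur.reverse :: acc).reverse := by
  rw [PySem.Chars.splitlines.go]

lemma pvGo_crlf (isB : Char → Bool) (rest cur : List Char) (acc : List (List Char)) :
    PySem.Chars.splitlines.go isB ('\r' :: '\n' :: rest) cur acc =
      PySem.Chars.splitlines.go isB rest [] (cur.reverse :: acc) := by
  rw [PySem.Chars.splitlines.go]

lemma pvGo_cons (isB : Char → Bool) (c : Char) (rest cur : List Char) (acc : List (List Char))
    (h : c ≠ '\r') :
    PySem.Chars.splitlines.go isB (c :: rest) cur acc =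
      if isB c then PySem.Chars.splitlines.go isB rest [] (cur.reverse :: acc)
      else PySem.Chars.splitlines.go isB rest (c :: cur) acc := by
  rw [PySem.Chars.splitlines.go.eq_def]
  split <;> simp_all

lemma pvGo_cr (isB : Char → Bool) (rest cur : List Char) (acc : List (List Char))
    (h : ∀ r', rest ≠ '\n' :: r') :
    PySem.Chars.splitlines.go isB ('\r' :: rest) cur acc =
      if isB '\r' then PySem.Chars.splitlines.go isB rest [] (cur.reverse :: acc)
      else PySem.Chars.splitlines.go isB rest ('\r' :: cur) acc := by
  rw [PySem.Chars.splitlines.go.eq_def]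
  split
  · simp_all
  · simp_all
  · rename_i heq
    injection heq with h1 h2
    subst h1; subst h2
    rfl

-- what go computes, via pvTakeLine/pvLinesOf, when isB agrees with {'\n','\r'} on s
lemma pvGo_spec : ∀ (n : Nat) (isB : Char → Bool) (s cur : List Char) (acc : List (List Char)),
    s.length ≤ n →
    (∀ c ∈ s, isB c = (decide (c = '\n') || decide (c = '\r'))) →
    PySem.Chars.splitlines.go isB s cur acc =
      acc.reverse ++
        (match s with
         | [] => if cur = [] then [] else [cur.reverse]
         | _ :: _ => (cur.reverse ++ (pvTakeLine s).1) :: pvLinesOf (pvTakeLine s).2) := by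
  intro n
  induction n with
  | zero =>
    intro isB s cur acc hn _
    have hs : s = [] := by cases s <;> simp_all
    subst hs
    rw [pvGo_nil]
    cases cur <;> simp
  | succ n ih =>
    intro isB s cur acc hn hB
    cases s with
    | nil =>
      rw [pvGo_nil]
      cases cur <;> simp
    | cons c rest =>
      by_cases hc : c = '\r'
      · subst hc
        have hBr : isB '\r' = true := by
          have := hB '\r' (by simp)
          simpa using this
        cases rest with
        | nil =>
          rw [pvGo_cr _ _ _ _ (by simp), hBr, if_pos rfl, pvGo_nil]
          simp [pvTakeLine, pvLinesOf_nil]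
        | cons d rest' =>
          by_cases hd : d = '\n'
          · subst hd
            rw [pvGo_crlf]
            rw [ih isB rest' [] (cur.reverse :: acc) (by simp at hn; omega)
                (fun x hx => hB x (by simp [hx]))]
            simp only [List.reverse_cons, List.append_assoc, List.singleton_append,
              List.reverse_nil, List.nil_append]
            congr 1
            have ht : pvTakeLine ('\r' :: '\n' :: rest') = ([], rest') := by
              simp [pvTakeLine]
            rw [ht]
            cases rest' with
            | nil => simp [pvLinesOf_nil]
            | cons e r => rw [pvLinesOf_cons]; simp
          · rw [pvGo_cr _ _ _ _ (by intro r' hr; injection hr with h1 _; exact hd h1),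
                hBr, if_pos rfl]
            rw [ih isB (d :: rest') [] (cur.reverse :: acc) (by simp at hn ⊢; omega)
                (fun x hx => hB x (by simp at hx ⊢; tauto))]
            simp only [List.reverse_cons, List.append_assoc, List.singleton_append,
              List.reverse_nil, List.nil_append]
            congr 1
            rw [pvTakeLine_cr d rest' hd]
            rw [pvLinesOf_cons]
            simp
      · rw [pvGo_cons _ _ _ _ _ hc]
        have hBc : isB c = decide (c = '\n') := by
          have := hB c (by simp)
          simp only [hc, decide_false, Bool.or_false] at this
          simpa using this
        by_cases hn' : c = '\n'
        · subst hn'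
          rw [hBc, if_pos (by simp)]
          rw [ih isB rest [] (cur.reverse :: acc) (by simp at hn; omega)
              (fun x hx => hB x (by simp [hx]))]
          simp only [List.reverse_cons, List.append_assoc, List.singleton_append,
            List.reverse_nil, List.nil_append]
          congr 1
          have ht : pvTakeLine ('\n' :: rest) = ([], rest) := by simp [pvTakeLine]
          rw [ht]
          cases rest with
          | nil => simp [pvLinesOf_nil]
          | cons e r => rw [pvLinesOf_cons]; simp
        · rw [hBc, if_neg (by simp [hn'])]
          rw [ih isB rest (c :: cur) acc (by simp at hn; omega)
              (fun x hx => hB x (by simp [hx]))]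
          have ht : pvTakeLine (c :: rest) = (c :: (pvTakeLine rest).1, (pvTakeLine rest).2) := by
            simp [pvTakeLine, hn', hc]
          rw [ht]
          congr 1
          cases rest with
          | nil => simp [pvTakeLine, pvLinesOf_nil]
          | cons e r => simp

-- on Dom characters, splitlines is exactly the pvTakeLine-induced line list
lemma pvSplitlines_eq (s : List Char) (h : ∀ c ∈ s, pvDomChar c = true) :
    PySem.Chars.splitlines s = pvLinesOf s := by
  unfold PySem.Chars.splitlines
  rw [pvGo_spec s.length _ s [] [] le_rfl]
  · cases s with
    | nil => simp [pvLinesOf_nil]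
    | cons c r => rw [pvLinesOf_cons]; simp
  · intro c hc
    have hd := h c hc
    simp only [pvDomChar, Bool.or_eq_true, Bool.and_eq_true, decide_eq_true_eq,
      beq_iff_eq] at hd
    by_cases e1 : c = '\n'
    · subst e1; decide
    · by_cases e2 : c = '\r'
      · subst e2; decide
      · have h10 : c.toNat ≠ 10 := fun hh => e1 (pvChar_toNat_ten c hh)
        have h13 : c.toNat ≠ 13 := fun hh => e2 (pvChar_toNat_thirteen c hh)
        simp only [e1, e2, decide_false, Bool.or_false]
        simp only [Bool.or_eq_false_iff, decide_eq_false_iff_not]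
        omega

-- B's streaming merge = "\n"-join of the merged rows over the line lists
lemma pvMerge_eq : ∀ (n : Nat) (s t : List Char), s.length + t.length ≤ n →
    pvMerge s t = PySem.Chars.join ['\n'] (pvRows (pvLinesOf s) (pvLinesOf t)) := by
  intro n
  induction n with
  | zero =>
    intro s t hn
    have hs : s = [] := by cases s <;> simp_all
    have ht : t = [] := by cases t <;> simp_all
    subst hs; subst ht
    rw [pvMerge.eq_def]
    simp [pvLinesOf_nil, pvRows, PySem.Chars.join_nil]
  | succ n ih =>
    intro s t hn
    rw [pvMerge.eq_def]
    cases s with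
    | nil =>
      cases t with
      | nil => simp [pvLinesOf_nil, pvRows, PySem.Chars.join_nil]
      | cons c r =>
        simp only
        rw [pvLinesOf_nil, pvLinesOf_cons, pvRows_nil_left]
        by_cases hq : (pvTakeLine (c :: r)).2 = []
        · rw [if_pos hq, hq, pvLinesOf_nil, PySem.Chars.join_singleton]
          simp
        · rw [if_neg hq]
          have hne := pvLinesOf_ne_nil _ hq
          obtain ⟨l, ls, hls⟩ := List.exists_cons_of_ne_nil hne
          rw [hls, PySem.Chars.join_cons_cons, ← hls]
          have hrec := ih [] (pvTakeLine (c :: r)).2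
            (by have := pvTakeLine_shrink (c :: r) (by simp)
                simp only [List.length_cons, List.length_nil] at *; omega)
          rw [hrec]
          rw [pvLinesOf_nil, pvRows_nil_left]
          simp
    | cons c r =>
      cases t with
      | nil =>
        simp only
        rw [pvLinesOf_nil, pvLinesOf_cons, pvRows_nil_right]
        by_cases hq : (pvTakeLine (c :: r)).2 = []
        · rw [if_pos hq, hq, pvLinesOf_nil, PySem.Chars.join_singleton]
          simp
        · rw [if_neg hq]
          have hne := pvLinesOf_ne_nil _ hq
          obtain ⟨l, ls, hls⟩ := List.exists_cons_of_ne_nil hne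
          rw [hls, PySem.Chars.join_cons_cons, ← hls]
          have hrec := ih (pvTakeLine (c :: r)).2 []
            (by have := pvTakeLine_shrink (c :: r) (by simp)
                simp only [List.length_cons, List.length_nil] at *; omega)
          rw [hrec]
          rw [pvLinesOf_nil, pvRows_nil_right]
          simp
      | cons d u =>
        simp only
        rw [pvLinesOf_cons c r, pvLinesOf_cons d u]
        simp only [pvRows]
        by_cases hq : (pvTakeLine (c :: r)).2 = [] ∧ (pvTakeLine (d :: u)).2 = []
        · rw [if_pos hq, hq.1, hq.2]
          simp [pvLinesOf_nil, pvRows, PySem.Chars.join_singleton]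
        · rw [if_neg hq]
          have hne : pvRows (pvLinesOf (pvTakeLine (c :: r)).2) (pvLinesOf (pvTakeLine (d :: u)).2) ≠ [] := by
            apply pvRows_ne_nil
            rcases Classical.not_and_iff_not_or_not.mp hq with h | h
            · exact Or.inl (pvLinesOf_ne_nil _ h)
            · exact Or.inr (pvLinesOf_ne_nil _ h)
          obtain ⟨l, ls, hls⟩ := List.exists_cons_of_ne_nil hne
          rw [hls, PySem.Chars.join_cons_cons, ← hls]
          have hrec := ih (pvTakeLine (c :: r)).2 (pvTakeLine (d :: u)).2
            (by
              have h1 := pvTakeLine_shrink (c :: r) (by simp)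
              have h2 := pvTakeLine_shrink (d :: u) (by simp)
              simp only [List.length_cons] at *; omega)
          rw [hrec]
          simp

-- A's result is the "\n"-join of pvMergeLongest over the split lines
lemma pvMergeLongest_eq (xs ys : List String) :
    ((xs.zip ys).map (fun p => p.1 ++ " " ++ p.2)) ++
      (if ys.length < xs.length then xs.drop ys.length
       else if xs.length < ys.length then ys.drop xs.length else []) = pvMergeLongest xs ys := by
  induction xs generalizing ys with
  | nil =>
    cases ys with
    | nil => simp [pvMergeLongest]
    | cons y ys => simp [pvMergeLongest]
  | cons x xs ih =>
    cases ys with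
    | nil => simp [pvMergeLongest]
    | cons y ys =>
      have h := ih ys
      simp only [List.zip_cons_cons, List.map_cons, List.cons_append, pvMergeLongest,
        List.length_cons, List.drop_succ_cons, add_lt_add_iff_right]
      exact congrArg _ h

lemma pvFoldA_eq (string string_ : String) :
    fold_strings string string_ =
      PySem.Str.join "\n" (pvMergeLongest (PySem.Str.splitlines string) (PySem.Str.splitlines string_)) := by
  dsimp only [fold_strings]
  rw [PySem.List.foldl_append_singleton_eq_map]
  rw [PySem.List.slice_from_natCast, PySem.List.slice_from_natCast]
  simp only [List.nil_append, gt_iff_lt]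
  congr 1
  rw [← pvMergeLongest_eq]
  congr 1
  split_ifs <;> simp_all

-- pushing ofList through the row merge and the join
lemma pvMergeLongest_map (xs ys : List (List Char)) :
    pvMergeLongest (xs.map String.ofList) (ys.map String.ofList) = (pvRows xs ys).map String.ofList := by
  induction xs generalizing ys with
  | nil =>
    cases ys <;> simp [pvMergeLongest, pvRows]
  | cons x xs ih =>
    cases ys with
    | nil => simp [pvMergeLongest, pvRows]
    | cons y ys =>
      simp only [List.map_cons, pvMergeLongest, pvRows, ih]
      congr 1
      rw [show (" " : String) = String.ofList [' '] from rfl]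
      rw [← String.ofList_append, ← String.ofList_append]
      simp

lemma pvJoin_map (l : List (List Char)) :
    PySem.Str.join "\n" (l.map String.ofList) = String.ofList (PySem.Chars.join ['\n'] l) := by
  simp only [PySem.Str.join]
  congr 1
  simp [Function.comp_def]

theorem fold_strings_spec_aux (string string_ : String) :
    Dom_fold_strings string string_ →
    fold_strings string string_ = fold_strings_alt string string_ := by
  intro hdom
  unfold Dom_fold_strings pvDomStr at hdom
  simp only [Bool.and_eq_true, List.all_eq_true] at hdom
  rw [pvFoldA_eq]
  have hsp : ∀ (u : String), (∀ c ∈ u.toList, pvDomChar c = true) →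
      PySem.Str.splitlines u = (pvLinesOf u.toList).map String.ofList := by
    intro u hu
    show (PySem.Chars.splitlines u.toList).map String.ofList = _
    rw [pvSplitlines_eq _ hu]
  rw [hsp string hdom.1, hsp string_ hdom.2, pvMergeLongest_map, pvJoin_map]
  unfold fold_strings_alt
  rw [pvMerge_eq (string.toList.length + string_.toList.length) _ _ le_rfl]

-- ===== VERDICT (by name: the statement is the Claim_ definition above) =====
theorem fold_strings_spec : Claim_equal_fold_strings := by
  intro s t h
  exact fold_strings_spec_aux s t h
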